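-- pv_equiv track=rewrite | github.com/areeb-h/cryptography-app | routes/password_crack.py | crack_password_set1
-- ===== SOURCE A (Python) =====
-- import itertools
--
-- def crack_password_set1(password_input):
--     # Define the characters that can be used in the password
--     characters = 'abcdefghijklmnopqrstuvwxyz0123456789'
--     tries = 0
--
--     # Generating all possible combinations of 3 characters using itertools.product
--     for password in itertools.product(characters, repeat=3):
--         tries += 1
--
--         # Converting the combination to a string and check if it matches the input password
--         if ''.join(password) == password_input:
--             # Return the cracked password, number of tries
--             return ''.join(password), tries
--
--     # If the password is not cracked, return None for the cracked password (or when performing set2 cracking function)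
--     return None, tries
-- ===== SOURCE B (Python) =====
-- def crack_password_set1(password_input):
--     # Closed form: tries is the base-36 rank of the 3-char password, no brute force.
--     characters = 'abcdefghijklmnopqrstuvwxyz0123456789'
--     if len(password_input) == 3 and all(c in characters for c in password_input):
--         i0 = characters.index(password_input[0])
--         i1 = characters.index(password_input[1])
--         i2 = characters.index(password_input[2])
--         return password_input, 1296 * i0 + 36 * i1 + i2 + 1
--     return None, len(characters) ** 3
-- ===== Notes on version B (the rewrite author's own statement) =====
-- stated objective: faster
-- what changed: Replaced the brute-force scan over all 36^3 itertools.product combinations by an O(1) closed form: validate that the input is 3 charset characters and compute tries as its base-36 rank + 1.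
import Mathlib
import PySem

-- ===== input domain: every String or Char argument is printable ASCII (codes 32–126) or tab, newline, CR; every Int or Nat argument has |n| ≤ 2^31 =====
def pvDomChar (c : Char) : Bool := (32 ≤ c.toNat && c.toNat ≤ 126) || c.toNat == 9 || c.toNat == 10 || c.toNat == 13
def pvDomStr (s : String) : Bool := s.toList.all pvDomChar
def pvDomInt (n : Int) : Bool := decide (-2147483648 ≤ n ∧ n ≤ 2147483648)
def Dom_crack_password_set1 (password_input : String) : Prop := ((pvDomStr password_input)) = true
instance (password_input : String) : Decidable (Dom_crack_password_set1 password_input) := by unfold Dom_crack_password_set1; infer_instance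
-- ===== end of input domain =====

-- B replaces A's brute-force scan over all 36^3 combinations by the closed-form
-- base-36 rank of the 3-character password (objective: faster, asymptotic).

-- ===== PORT A =====
-- the fixed charset
def pvChars : List Char := "abcdefghijklmnopqrstuvwxyz0123456789".toList

-- the for-loop of A: scan the combinations, counting tries, early return on match
def pvScanA (l : List (Char × Char × Char)) (tries : Int) (target : String) :
    Option String × Int :=
  match l with
  | [] => (none, tries)
  | p :: rest =>
    let tries := tries + 1
    let s := String.ofList [p.1, p.2.1, p.2.2]
    if s = target then (some s, tries) else pvScanA rest tries target

-- itertools.product(characters, repeat=3) in lexicographic order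
def pvProd3 : List (Char × Char × Char) :=
  pvChars.flatMap (fun a => pvChars.flatMap (fun b => pvChars.map (fun c => (a, b, c))))

def crack_password_set1 (password_input : String) : Option String × Int :=
  pvScanA pvProd3 0 password_input

-- ===== PORT B =====
def crack_password_set1_alt (password_input : String) : Option String × Int :=
  match password_input.toList with
  | [a, b, c] =>
    if a ∈ pvChars ∧ b ∈ pvChars ∧ c ∈ pvChars then
      (some password_input,
        1296 * (pvChars.idxOf a : Int) + 36 * (pvChars.idxOf b : Int)
          + (pvChars.idxOf c : Int) + 1)
    else (none, (pvChars.length : Int) ^ 3)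
  | _ => (none, (pvChars.length : Int) ^ 3)

-- ===== PRECONDITION & SPEC =====
def Spec_crack_password_set1 (password_input : String) (out : Option String × Int) : Prop := out = crack_password_set1_alt password_input
instance (password_input : String) (out : Option String × Int) : Decidable (Spec_crack_password_set1 password_input out) := by unfold Spec_crack_password_set1; infer_instance

-- ===== CLAIM (what is proved, stated in full; the proofs are below) =====
def Claim_equal_crack_password_set1 : Prop := ∀ (password_input : String), Dom_crack_password_set1 password_input → Spec_crack_password_set1 password_input (crack_password_set1 password_input)

-- ===== LEMMAS AND PROOFS =====

-- scanning a list with no match just counts its length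
theorem pvScanA_none (l : List (Char × Char × Char)) (t : Int) (target : String)
    (h : ∀ p ∈ l, String.ofList [p.1, p.2.1, p.2.2] ≠ target) :
    pvScanA l t target = (none, t + l.length) := by
  induction l generalizing t with
  | nil => simp [pvScanA]
  | cons p rest ih =>
    simp only [pvScanA]
    rw [if_neg (h p (List.mem_cons_self ..))]
    rw [ih _ (fun q hq => h q (List.mem_cons_of_mem _ hq))]
    simp only [List.length_cons]
    congr 1
    push_cast
    ring

-- skipping a matchless prefix
theorem pvScanA_append_skip (l1 l2 : List (Char × Char × Char)) (t : Int) (target : String)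
    (h : ∀ p ∈ l1, String.ofList [p.1, p.2.1, p.2.2] ≠ target) :
    pvScanA (l1 ++ l2) t target = pvScanA l2 (t + l1.length) target := by
  induction l1 generalizing t with
  | nil => simp
  | cons p rest ih =>
    simp only [List.cons_append, pvScanA]
    rw [if_neg (h p (List.mem_cons_self ..))]
    rw [ih _ (fun q hq => h q (List.mem_cons_of_mem _ hq))]
    simp only [List.length_cons]
    congr 1
    push_cast
    ring

-- hitting the match at the head
theorem pvScanA_hit (p : Char × Char × Char) (l : List (Char × Char × Char)) (t : Int)
    (target : String) (h : String.ofList [p.1, p.2.1, p.2.2] = target) :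
    pvScanA (p :: l) t target = (some target, t + 1) := by
  simp [pvScanA, h]

-- an element never occurs in the take up to its first index
theorem not_mem_take_idxOf {α : Type} [DecidableEq α] (a : α) (l : List α) :
    a ∉ l.take (l.idxOf a) := by
  induction l with
  | nil => simp
  | cons x xs ih =>
    by_cases hx : x = a
    · simp [hx, List.idxOf_cons_self]
    · rw [List.idxOf_cons_ne _ (by simpa using hx)]
      simp only [List.take_succ_cons, List.mem_cons]
      rintro (h | h)
      · exact hx h.symm
      · exact ih h

theorem take_cons_drop {α : Type} [DecidableEq α] (a : α) (l : List α) (h : a ∈ l) :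
    l = l.take (l.idxOf a) ++ a :: l.drop (l.idxOf a + 1) := by
  have hlt : l.idxOf a < l.length := List.idxOf_lt_length_of_mem h
  have := List.take_append_drop (l.idxOf a) l
  rw [List.drop_eq_getElem_cons hlt] at this
  rw [List.getElem_idxOf hlt] at this
  exact this.symm

theorem ofList_inj (l1 l2 : List Char) (h : String.ofList l1 = String.ofList l2) :
    l1 = l2 := by
  have := congrArg String.toList h
  simpa using this

theorem mk3_inj (a b c x y z : Char) :
    String.ofList [x, y, z] = String.ofList [a, b, c] ↔ (x = a ∧ y = b ∧ z = c) := by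
  constructor
  · intro h
    have := ofList_inj _ _ h
    simp at this; tauto
  · rintro ⟨rfl, rfl, rfl⟩; rfl

-- the brute force scan over the full product equals the base-36 rank formula
theorem scan_prod_eq (a b c : Char) (ha : a ∈ pvChars) (hb : b ∈ pvChars)
    (hc : c ∈ pvChars) :
    pvScanA pvProd3 0 (String.ofList [a, b, c]) =
      (some (String.ofList [a, b, c]),
        1296 * (pvChars.idxOf a : Int) + 36 * (pvChars.idxOf b : Int)
          + (pvChars.idxOf c : Int) + 1) := by
  set t := String.ofList [a, b, c] with ht
  set f : Char → List (Char × Char × Char) :=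
    fun x => pvChars.flatMap (fun y => pvChars.map (fun z => (x, y, z))) with hf
  set g : Char → List (Char × Char × Char) :=
    fun y => pvChars.map (fun z => (a, y, z)) with hg
  have splitA := take_cons_drop a pvChars ha
  have splitB := take_cons_drop b pvChars hb
  have splitC := take_cons_drop c pvChars hc
  have hgb : g b = (pvChars.take (pvChars.idxOf c)).map (fun z => (a, b, z)) ++
      ((a, b, c) :: (pvChars.drop (pvChars.idxOf c + 1)).map (fun z => (a, b, z))) := by
    show pvChars.map (fun z => (a, b, z)) = _
    conv_lhs => rw [splitC]
    rw [List.map_append, List.map_cons]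
  have hfa : f a = (pvChars.take (pvChars.idxOf b)).flatMap g ++
      ((pvChars.take (pvChars.idxOf c)).map (fun z => (a, b, z)) ++
        ((a, b, c) :: ((pvChars.drop (pvChars.idxOf c + 1)).map (fun z => (a, b, z)) ++
          (pvChars.drop (pvChars.idxOf b + 1)).flatMap g))) := by
    show pvChars.flatMap g = _
    conv_lhs => rw [splitB]
    rw [List.flatMap_append, List.flatMap_cons, hgb]
    simp [List.append_assoc, List.cons_append]
  have hL : pvProd3 =
      (pvChars.take (pvChars.idxOf a)).flatMap f ++
        ((pvChars.take (pvChars.idxOf b)).flatMap g ++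
          ((pvChars.take (pvChars.idxOf c)).map (fun z => (a, b, z)) ++
            ((a, b, c) :: (((pvChars.drop (pvChars.idxOf c + 1)).map (fun z => (a, b, z)) ++
              (pvChars.drop (pvChars.idxOf b + 1)).flatMap g) ++
              (pvChars.drop (pvChars.idxOf a + 1)).flatMap f)))) := by
    show pvChars.flatMap f = _
    conv_lhs => rw [splitA]
    rw [List.flatMap_append, List.flatMap_cons, hfa]
    simp [List.append_assoc, List.cons_append]
  rw [hL]
  have hnota : a ∉ pvChars.take (pvChars.idxOf a) := not_mem_take_idxOf a pvChars
  have hnotb : b ∉ pvChars.take (pvChars.idxOf b) := not_mem_take_idxOf b pvChars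
  have hnotc : c ∉ pvChars.take (pvChars.idxOf c) := not_mem_take_idxOf c pvChars
  rw [pvScanA_append_skip _ _ _ _ (by
    intro p hp
    simp only [hf, List.mem_flatMap, List.mem_map] at hp
    obtain ⟨x, hx, y, hy, z, hz, rfl⟩ := hp
    intro heq
    obtain ⟨rfl, -, -⟩ := (mk3_inj a b c x y z).mp heq
    exact hnota hx)]
  rw [pvScanA_append_skip _ _ _ _ (by
    intro p hp
    simp only [hg, List.mem_flatMap, List.mem_map] at hp
    obtain ⟨y, hy, z, hz, rfl⟩ := hp
    intro heq
    obtain ⟨-, rfl, -⟩ := (mk3_inj a b c a y z).mp heq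
    exact hnotb hy)]
  rw [pvScanA_append_skip _ _ _ _ (by
    intro p hp
    simp only [List.mem_map] at hp
    obtain ⟨z, hz, rfl⟩ := hp
    intro heq
    obtain ⟨-, -, rfl⟩ := (mk3_inj a b c a b z).mp heq
    exact hnotc hz)]
  rw [pvScanA_hit _ _ _ _ (by rw [ht])]
  have h36 : pvChars.length = 36 := by decide
  have hlenf : ((pvChars.take (pvChars.idxOf a)).flatMap f).length
      = 1296 * pvChars.idxOf a := by
    have hfx : ∀ x, (f x).length = 1296 := by
      intro x
      simp [hf, List.length_flatMap, h36]
    have hle : pvChars.idxOf a ≤ pvChars.length :=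
      le_of_lt (List.idxOf_lt_length_of_mem ha)
    simp [List.length_flatMap, hfx, Nat.min_eq_left hle, Nat.mul_comm]
  have hleng : ((pvChars.take (pvChars.idxOf b)).flatMap g).length
      = 36 * pvChars.idxOf b := by
    have hgy : ∀ y, (g y).length = 36 := by
      intro y
      simp [hg, h36]
    have hle : pvChars.idxOf b ≤ pvChars.length :=
      le_of_lt (List.idxOf_lt_length_of_mem hb)
    simp [List.length_flatMap, hgy, Nat.min_eq_left hle, Nat.mul_comm]
  have hlenc : ((pvChars.take (pvChars.idxOf c)).map (fun z => (a, b, z))).length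
      = pvChars.idxOf c := by
    have hle : pvChars.idxOf c ≤ pvChars.length :=
      le_of_lt (List.idxOf_lt_length_of_mem hc)
    simp [List.length_take, Nat.min_eq_left hle]
  rw [hlenf, hleng, hlenc]
  congr 1
  push_cast
  ring

-- full product has 46656 elements
theorem pvProd3_length : (pvProd3 : List (Char × Char × Char)).length = 46656 := by
  have h36 : pvChars.length = 36 := by decide
  have h1 : ∀ x : Char,
      ((pvChars.flatMap (fun y => pvChars.map (fun z => (x, y, z)))) :
        List (Char × Char × Char)).length = 1296 := by
    intro x
    simp [List.length_flatMap, h36]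
  simp [pvProd3, List.length_flatMap, h1, h36]

-- every element of the product is a triple of charset characters
theorem mem_prod3 {p : Char × Char × Char} (hp : p ∈ pvProd3) :
    p.1 ∈ pvChars ∧ p.2.1 ∈ pvChars ∧ p.2.2 ∈ pvChars := by
  simp only [pvProd3, List.mem_flatMap, List.mem_map] at hp
  obtain ⟨x, hx, y, hy, z, hz, rfl⟩ := hp
  exact ⟨hx, hy, hz⟩

theorem scan_miss (s : String) (h : ∀ p ∈ pvProd3, String.ofList [p.1, p.2.1, p.2.2] ≠ s) :
    pvScanA pvProd3 0 s = (none, (pvChars.length : Int) ^ 3) := by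
  rw [pvScanA_none _ _ _ h, pvProd3_length]
  norm_num
  decide

-- ===== VERDICT (by name: the statement is the Claim_ definition above) =====
theorem crack_password_set1_spec : Claim_equal_crack_password_set1 := by
  intro s _
  unfold Spec_crack_password_set1 crack_password_set1 crack_password_set1_alt
  match hts : s.toList with
  | [a, b, c] =>
    dsimp only
    have hs : s = String.ofList [a, b, c] := by rw [← hts]; simp
    by_cases hmem : a ∈ pvChars ∧ b ∈ pvChars ∧ c ∈ pvChars
    · rw [if_pos hmem]
      rw [hs, scan_prod_eq a b c hmem.1 hmem.2.1 hmem.2.2]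
    · rw [if_neg hmem]
      exact scan_miss s (by
        intro p hp
        obtain ⟨h1, h2, h3⟩ := mem_prod3 hp
        rw [hs]
        intro heq
        obtain ⟨rfl, rfl, rfl⟩ := (mk3_inj a b c p.1 p.2.1 p.2.2).mp heq
        exact hmem ⟨h1, h2, h3⟩)
  | [] =>
    dsimp only
    exact scan_miss s (by
      intro p _ h
      have := congrArg String.toList h
      simp [hts] at this)
  | [a] =>
    dsimp only
    exact scan_miss s (by
      intro p _ h
      have := congrArg String.toList h
      simp [hts] at this)
  | [a, b] =>
    dsimp only
    exact scan_miss s (by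
      intro p _ h
      have := congrArg String.toList h
      simp [hts] at this)
  | a :: b :: c :: d :: rest =>
    dsimp only
    exact scan_miss s (by
      intro p _ h
      have := congrArg String.toList h
      simp [hts] at this)
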